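-- pv_equiv track=rewrite | github.com/ksomemo/Competitive-programming | atcoder/abc/105/D.py | loop
-- ===== SOURCE A (Python) =====
-- def loop(c):
--     ans = 0
--     m = {}
--     for x in c:
--         if not x in m:
--             m[x] = 0
--         else:
--             ans += m[x]
--         m[x] += 1
--
--     return ans
-- ===== SOURCE B (Python) =====
-- def loop(c):
--     freq = {}
--     for x in c:
--         freq[x] = freq.get(x, 0) + 1
--     return sum(k * (k - 1) // 2 for k in freq.values())
-- ===== Notes on version B (the rewrite author's own statement) =====
-- stated objective: simpler
-- what changed: Replaces the single-pass add-running-count-then-increment accumulation with a build-frequency-table pass followed by a reduce with the closed form k*(k-1)//2 per bucket.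
import Mathlib
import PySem

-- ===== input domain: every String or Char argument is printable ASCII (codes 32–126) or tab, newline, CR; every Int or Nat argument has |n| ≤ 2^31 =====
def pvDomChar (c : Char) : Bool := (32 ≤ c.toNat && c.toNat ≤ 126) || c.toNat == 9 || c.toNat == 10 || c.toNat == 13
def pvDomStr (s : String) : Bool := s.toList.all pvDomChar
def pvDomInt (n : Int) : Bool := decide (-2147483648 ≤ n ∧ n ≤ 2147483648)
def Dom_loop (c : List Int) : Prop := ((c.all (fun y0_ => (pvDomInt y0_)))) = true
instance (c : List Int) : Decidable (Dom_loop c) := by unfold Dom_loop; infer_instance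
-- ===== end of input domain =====

-- B builds a frequency table first and then sums the closed form k*(k-1)//2 over the buckets,
-- instead of A's single-pass running accumulation; same cost, plainer decomposition.

-- ===== PORT A =====
def loopStepA (st : Int × PySem.Dict Int Int) (x : Int) : Int × PySem.Dict Int Int :=
  let ans := st.1
  let m := st.2
  -- if not x in m: m[x] = 0  else: ans += m[x]
  let p : Int × PySem.Dict Int Int :=
    if m.contains x = false then (ans, m.insert x 0) else (ans + m.getD x 0, m)
  -- m[x] += 1  (the key is present in both branches)
  (p.1, p.2.insert x (p.2.getD x 0 + 1))

def loop (c : List Int) : Int :=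
  (c.foldl loopStepA (0, PySem.Dict.empty)).1

-- ===== PORT B =====
def pairsOf (k : Int) : Int := PySem.Int.floordiv (k * (k - 1)) 2

def loop_alt (c : List Int) : Int :=
  let freq := c.foldl (fun (d : PySem.Dict Int Int) x => d.insert x (d.getD x 0 + 1)) PySem.Dict.empty
  (freq.values.map (fun k => pairsOf k)).sum

-- ===== PRECONDITION & SPEC =====
def Spec_loop (c : List Int) (out : Int) : Prop := out = loop_alt c
instance (c : List Int) (out : Int) : Decidable (Spec_loop c out) := by unfold Spec_loop; infer_instance

-- ===== CLAIM (what is proved, stated in full; the proofs are below) =====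
def Claim_equal_loop : Prop := ∀ (c : List Int), Dom_loop c → Spec_loop c (loop c)

-- ===== LEMMAS AND PROOFS =====

-- sum of pairsOf over the values of a dict
def pairSum (d : PySem.Dict Int Int) : Int := (d.values.map (fun k => pairsOf k)).sum

def stepB (d : PySem.Dict Int Int) (x : Int) : PySem.Dict Int Int :=
  d.insert x (d.getD x 0 + 1)

lemma pairsOf_succ (v : Int) : pairsOf (v + 1) = pairsOf v + v := by
  unfold pairsOf
  rw [PySem.Int.floordiv_eq_ediv_of_pos (by norm_num), PySem.Int.floordiv_eq_ediv_of_pos (by norm_num)]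
  obtain ⟨t, ht⟩ : Even (v * (v - 1)) := by
    rcases Int.even_or_odd v with h | h
    · exact h.mul_right _
    · exact (Odd.sub_odd h odd_one).mul_left _
  have h1 : v * (v - 1) = 2 * t := by omega
  have h2 : (v + 1) * (v + 1 - 1) = 2 * (t + v) := by nlinarith
  rw [h1, h2, Int.mul_ediv_cancel_left _ (by norm_num), Int.mul_ediv_cancel_left _ (by norm_num)]

-- A's one step: the answer grows by the current count of x (0 when x is fresh),
-- and the dict evolves exactly as B's counter-building step.
lemma stepA_eq (ans : Int) (m : PySem.Dict Int Int) (x : Int) :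
    loopStepA (ans, m) x = (ans + m.getD x 0, stepB m x) := by
  unfold loopStepA stepB
  cases h : m.contains x with
  | false =>
    simp only [h, if_pos]
    rw [PySem.Dict.getD_of_not_contains m 0 h]
    simp [PySem.Dict.insert_insert_self, PySem.Dict.getD_insert_self]
  | true => simp [h]

-- modifying the (unique) entry at key x changes the pair sum by pairsOf w - pairsOf v
lemma list_pair_sum (l : List (Int × Int)) (x v w : Int)
    (hnd : (l.map Prod.fst).Nodup) (hmem : (x, v) ∈ l) :
    ((l.map (fun p => if p.1 = x then (x, w) else p)).map (fun p => pairsOf p.2)).sum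
      = (l.map (fun p => pairsOf p.2)).sum + pairsOf w - pairsOf v := by
  induction l with
  | nil => simp at hmem
  | cons p rest ih =>
    simp only [List.map_cons, List.nodup_cons] at hnd
    by_cases h : p.1 = x
    · have hp : p = (x, v) := by
        rcases List.mem_cons.mp hmem with h1 | h1
        · exact h1.symm
        · exact absurd (List.mem_map.mpr ⟨(x, v), h1, rfl⟩) (h ▸ hnd.1)
      have hrest : rest.map (fun p => if p.1 = x then (x, w) else p) = rest.map id := by
        apply List.map_congr_left
        intro q hq
        have hne : q.1 ≠ x := fun he => (h ▸ hnd.1) (List.mem_map.mpr ⟨q, hq, he⟩)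
        simp [hne]
      rw [List.map_id] at hrest
      subst hp
      simp [hrest]
      ring
    · have hmem' : (x, v) ∈ rest := by
        rcases List.mem_cons.mp hmem with h1 | h1
        · exact absurd (congrArg Prod.fst h1.symm) h
        · exact h1
      have hih := ih hnd.2 hmem'
      simp only [List.map_cons, List.sum_cons, if_neg h]
      rw [hih]; ring

lemma pairSum_stepB (m : PySem.Dict Int Int) (x : Int) (hnd : m.keys.Nodup) :
    pairSum (stepB m x) = pairSum m + m.getD x 0 := by
  unfold pairSum stepB
  simp only [PySem.Dict.values, List.map_map, Function.comp_def]
  cases h : m.contains x with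
  | true =>
    have hsome : (m.get? x).isSome := by
      rw [← PySem.Dict.contains_eq_isSome_get?]; exact h
    obtain ⟨v, hv⟩ := Option.isSome_iff_exists.mp hsome
    have hgd : m.getD x 0 = v := PySem.Dict.getD_of_get?_eq_some m 0 hv
    have hitems : (x, v) ∈ m.items := PySem.Dict.mem_items_of_get?_eq_some m hv
    have hkeys : (m.items.map Prod.fst).Nodup := by
      simpa [PySem.Dict.keys] using hnd
    rw [PySem.Dict.items_insert_of_contains m _ h]
    simp only [beq_iff_eq]
    rw [list_pair_sum m.items x v (m.getD x 0 + 1) hkeys hitems, hgd, pairsOf_succ]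
    ring
  | false =>
    rw [PySem.Dict.items_insert_of_not_contains m _ h, PySem.Dict.getD_of_not_contains m 0 h]
    simp [pairsOf, PySem.Int.floordiv]

-- the loop invariant: A's running answer plus the pair sum already in the dict
-- equals the pair sum of the dict after B's counter fold
lemma main_inv (c : List Int) : ∀ (ans : Int) (m : PySem.Dict Int Int), m.keys.Nodup →
    (c.foldl loopStepA (ans, m)).1 + pairSum m = ans + pairSum (c.foldl stepB m) := by
  induction c with
  | nil => intro ans m _; simp
  | cons x c ih =>
    intro ans m hnd
    have hnd' : (stepB m x).keys.Nodup := PySem.Dict.nodup_keys_insert _ _ _ hnd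
    rw [List.foldl_cons, stepA_eq, List.foldl_cons]
    have h1 := ih (ans + m.getD x 0) (stepB m x) hnd'
    have h2 := pairSum_stepB m x hnd
    omega

-- ===== VERDICT (by name: the statement is the Claim_ definition above) =====
theorem loop_spec : Claim_equal_loop := by
  intro c _
  show loop c = loop_alt c
  unfold loop loop_alt
  have := main_inv c 0 PySem.Dict.empty (by simp [PySem.Dict.keys, PySem.Dict.empty])
  simp only [pairSum, PySem.Dict.values] at this
  simpa [stepB, PySem.Dict.empty, PySem.Dict.values] using this
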